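-- pv_equiv track=rewrite | github.com/DanielvS87/darts-stuff-python | app.py | multi_nested_loop
-- ===== SOURCE A (Python) =====
-- singles = []
--
-- doubles = []
--
-- triples = []
--
-- def multi_nested_loop(matched_num, arr1, arr2, arr3=[]):
--     matches = []
--
--     for num1 in arr1:
--         a = 'S' if arr1 == singles else 'T'
--         for num2 in arr2:
--             if arr2 == singles:
--                 b = 'S'
--             elif arr2 == doubles:
--                 b = 'D'
--             else:
--                 b = 'T'
--             # only when three arrays are given
--             if len(arr3) != 0:
--                 for num3 in arr3:
--                     c = 'D'
--                     n1 = 3 * num1 if arr1 == triples else num1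
--                     n2 = 3 * num2 if arr2 == triples else num2
--                     n3 = 2 * num3
--                     total = int(n1) + int(n2) + int(n3)
--                     if matched_num == total:
--                         order = f"{a}{num1}, {b}{num2}, {c}{num3}"
--                         matches.append(order)
--             else:
--                 total = num1 + num2
--                 if matched_num == total:
--                     order = f"{num1}, {num2}"
--                     matches.append(order)
--     return matches
-- ===== SOURCE B (Python) =====
-- def multi_nested_loop(matched_num, arr1, arr2, arr3=[]):
--     matches = []
--     if len(arr3) != 0:
--         # index arr3 by the value it contributes (2*num3), keeping order
--         idx = {}
--         for num3 in arr3: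
--             k = 2 * num3
--             idx[k] = idx.get(k, []) + [num3]
--         for num1 in arr1:
--             for num2 in arr2:
--                 for num3 in idx.get(matched_num - num1 - num2, []):
--                     matches.append(f"T{num1}, T{num2}, D{num3}")
--     else:
--         idx = {}
--         for num2 in arr2:
--             idx[num2] = idx.get(num2, []) + [num2]
--         for num1 in arr1:
--             for num2 in idx.get(matched_num - num1, []):
--                 matches.append(f"{num1}, {num2}")
--     return matches
-- ===== Notes on version B (the rewrite author's own statement) =====
-- stated objective: faster
-- what changed: B replaces the inner scan over arr3 (resp. arr2 in the two-array case) with a hash index from contributed value to the ordered list of elements, built once, so each (num1,num2) pair does one dict lookup instead of scanning arr3; the dead S/D letter logic (the module-level singles/doubles/triples are all empty) is dropped.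
import Mathlib
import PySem

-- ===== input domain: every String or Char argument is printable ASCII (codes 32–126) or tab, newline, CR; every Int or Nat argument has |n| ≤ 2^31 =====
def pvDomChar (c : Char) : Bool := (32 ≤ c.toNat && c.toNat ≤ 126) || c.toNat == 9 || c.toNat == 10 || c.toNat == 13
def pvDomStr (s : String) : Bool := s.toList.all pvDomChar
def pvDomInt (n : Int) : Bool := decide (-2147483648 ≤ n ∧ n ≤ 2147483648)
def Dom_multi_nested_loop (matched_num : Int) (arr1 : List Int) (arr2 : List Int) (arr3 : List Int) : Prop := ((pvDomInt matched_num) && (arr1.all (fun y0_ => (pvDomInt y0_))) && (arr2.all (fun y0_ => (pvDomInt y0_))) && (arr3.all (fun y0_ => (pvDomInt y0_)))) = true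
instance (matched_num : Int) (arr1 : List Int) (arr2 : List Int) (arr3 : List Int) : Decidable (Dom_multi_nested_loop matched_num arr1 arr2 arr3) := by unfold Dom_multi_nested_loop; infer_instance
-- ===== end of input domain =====

-- B indexes arr3 (resp. arr2) by contributed value in a dict built once, replacing A's inner
-- scans: one lookup per (num1, num2) pair instead of a pass over arr3 (objective: faster).

-- ===== PORT A =====
-- the module-level lists singles/doubles/triples are all [] in the shown module; the
-- comparisons 'arr == singles' etc. are ported literally as comparisons with [].
def multi_nested_loop (matched_num : Int) (arr1 : List Int) (arr2 : List Int) (arr3 : List Int) : List String :=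
  arr1.foldl (fun ms num1 =>
    let a : String := if arr1 = ([] : List Int) then "S" else "T"
    arr2.foldl (fun ms num2 =>
      let b : String :=
        if arr2 = ([] : List Int) then "S"
        else if arr2 = ([] : List Int) then "D"
        else "T"
      if arr3.length ≠ 0 then
        arr3.foldl (fun ms num3 =>
          let c : String := "D"
          let n1 : Int := if arr1 = ([] : List Int) then 3 * num1 else num1
          let n2 : Int := if arr2 = ([] : List Int) then 3 * num2 else num2
          let n3 : Int := 2 * num3
          let total := n1 + n2 + n3
          if matched_num = total then
            ms ++ [a ++ PySem.Int.toStr num1 ++ ", " ++ b ++ PySem.Int.toStr num2 ++ ", " ++ c ++ PySem.Int.toStr num3]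
          else ms) ms
      else
        let total := num1 + num2
        if matched_num = total then
          ms ++ [PySem.Int.toStr num1 ++ ", " ++ PySem.Int.toStr num2]
        else ms) ms) []

-- ===== PORT B =====
def multi_nested_loop_alt (matched_num : Int) (arr1 : List Int) (arr2 : List Int) (arr3 : List Int) : List String :=
  if arr3.length ≠ 0 then
    let idx : PySem.Dict Int (List Int) :=
      arr3.foldl (fun d num3 => d.modify (2 * num3) [] (· ++ [num3])) PySem.Dict.empty
    arr1.foldl (fun ms num1 =>
      arr2.foldl (fun ms num2 =>
        (idx.getD (matched_num - num1 - num2) []).foldl (fun ms num3 =>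
          ms ++ ["T" ++ PySem.Int.toStr num1 ++ ", T" ++ PySem.Int.toStr num2 ++ ", D" ++ PySem.Int.toStr num3]) ms) ms) []
  else
    let idx : PySem.Dict Int (List Int) :=
      arr2.foldl (fun d num2 => d.modify num2 [] (· ++ [num2])) PySem.Dict.empty
    arr1.foldl (fun ms num1 =>
      (idx.getD (matched_num - num1) []).foldl (fun ms num2 =>
        ms ++ [PySem.Int.toStr num1 ++ ", " ++ PySem.Int.toStr num2]) ms) []

-- ===== PRECONDITION & SPEC =====
def Spec_multi_nested_loop (matched_num : Int) (arr1 : List Int) (arr2 : List Int) (arr3 : List Int) (out : List String) : Prop := out = multi_nested_loop_alt matched_num arr1 arr2 arr3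
instance (matched_num : Int) (arr1 : List Int) (arr2 : List Int) (arr3 : List Int) (out : List String) : Decidable (Spec_multi_nested_loop matched_num arr1 arr2 arr3 out) := by unfold Spec_multi_nested_loop; infer_instance

-- ===== CLAIM (what is proved, stated in full; the proofs are below) =====
def Claim_equal_multi_nested_loop : Prop := ∀ (matched_num : Int) (arr1 : List Int) (arr2 : List Int) (arr3 : List Int), Dom_multi_nested_loop matched_num arr1 arr2 arr3 → Spec_multi_nested_loop matched_num arr1 arr2 arr3 (multi_nested_loop matched_num arr1 arr2 arr3)

-- ===== LEMMAS AND PROOFS =====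

-- the grouping dict of B, looked up at key k, is exactly the ordered filter of the list
lemma idx_getD (l : List Int) (key : Int → Int) (k : Int) :
    (l.foldl (fun d v => d.modify (key v) [] (· ++ [v])) PySem.Dict.empty).getD k []
      = l.filter (fun v => key v == k) := by
  have h := PySem.Dict.getD_foldl_modify_append (l := l.map (fun v => (key v, v)))
    (d := (PySem.Dict.empty : PySem.Dict Int (List Int))) (c := k)
  simp only [List.foldl_map] at h
  rw [h]
  simp [List.filter_map, List.map_map, Function.comp_def]

-- A's piecewise-appended triple string equals B's f-string grouping (pure re-association)
lemma strEq (s1 s2 s3 : String) :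
    "T" ++ s1 ++ ", " ++ "T" ++ s2 ++ ", " ++ "D" ++ s3
      = "T" ++ s1 ++ ", T" ++ s2 ++ ", D" ++ s3 := by
  apply String.ext
  simp [String.toList_append]

-- A's inner scan over arr3 (for fixed num1, num2) is the fold over the matching filter
lemma inner3 (matched_num num1 num2 : Int) (arr3 : List Int) (ms : List String) :
    arr3.foldl (fun ms num3 =>
        if matched_num = num1 + num2 + 2 * num3 then
          ms ++ ["T" ++ PySem.Int.toStr num1 ++ ", " ++ "T" ++ PySem.Int.toStr num2 ++ ", " ++ "D" ++ PySem.Int.toStr num3]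
        else ms) ms
      = (arr3.filter (fun v => 2 * v == matched_num - num1 - num2)).foldl (fun ms num3 =>
          ms ++ ["T" ++ PySem.Int.toStr num1 ++ ", T" ++ PySem.Int.toStr num2 ++ ", D" ++ PySem.Int.toStr num3]) ms := by
  induction arr3 generalizing ms with
  | nil => rfl
  | cons v t ih =>
    simp only [List.foldl_cons, List.filter_cons]
    by_cases h : matched_num = num1 + num2 + 2 * v
    · rw [if_pos h, if_pos (show (2 * v == matched_num - num1 - num2) = true by
        simp only [beq_iff_eq]; omega)]
      simp only [List.foldl_cons]
      rw [ih, strEq]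
    · rw [if_neg h, if_neg (show ¬ ((2 * v == matched_num - num1 - num2) = true) by
        simp only [beq_iff_eq]; omega)]
      exact ih ms

-- A's inner scan over arr2 in the two-array case, likewise
lemma inner2 (matched_num num1 : Int) (arr2 : List Int) (ms : List String) :
    arr2.foldl (fun ms num2 =>
        if matched_num = num1 + num2 then
          ms ++ [PySem.Int.toStr num1 ++ ", " ++ PySem.Int.toStr num2]
        else ms) ms
      = (arr2.filter (fun v => v == matched_num - num1)).foldl (fun ms num2 =>
          ms ++ [PySem.Int.toStr num1 ++ ", " ++ PySem.Int.toStr num2]) ms := by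
  induction arr2 generalizing ms with
  | nil => rfl
  | cons v t ih =>
    simp only [List.foldl_cons, List.filter_cons]
    by_cases h : matched_num = num1 + v
    · rw [if_pos h, if_pos (show (v == matched_num - num1) = true by
        simp only [beq_iff_eq]; omega)]
      simp only [List.foldl_cons]
      rw [ih]
    · rw [if_neg h, if_neg (show ¬ ((v == matched_num - num1) = true) by
        simp only [beq_iff_eq]; omega)]
      exact ih ms

-- ===== VERDICT (by name: the statement is the Claim_ definition above) =====
theorem multi_nested_loop_spec : Claim_equal_multi_nested_loop := by
  intro matched_num arr1 arr2 arr3 _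
  unfold Spec_multi_nested_loop multi_nested_loop multi_nested_loop_alt
  cases arr1 with
  | nil => simp
  | cons x1 t1 =>
    cases arr2 with
    | nil => simp
    | cons x2 t2 =>
      simp only [if_neg (by simp : ¬(x1 :: t1 = ([] : List Int))),
        if_neg (by simp : ¬(x2 :: t2 = ([] : List Int)))]
      by_cases h3 : arr3.length ≠ 0
      · simp only [if_pos h3]
        congr 1
        funext ms num1
        congr 1
        funext ms' num2
        rw [idx_getD arr3 (fun v => 2 * v)]
        exact inner3 matched_num num1 num2 arr3 ms'
      · simp only [if_neg h3]
        congr 1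
        funext ms num1
        rw [idx_getD (x2 :: t2) (fun v => v)]
        exact inner2 matched_num num1 (x2 :: t2) ms
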